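-- pv_equiv track=rewrite | github.com/14ag/python-arc | char_occurences.py | checkIfCharOccurrencesEqual
-- ===== SOURCE A (Python) =====
-- def checkIfCharOccurrencesEqual(s):
--     obj={}
--     for c in s:
--         if c in obj:
--             obj[c]+=1
--         else:
--             obj[c]=1
--
--     for value in obj.values():
--         if value!=obj[s[0]]:
--             return False
--
--     return True
-- ===== SOURCE B (Python) =====
-- def checkIfCharOccurrencesEqual(s):
--     # sort the characters, then scan once collecting run lengths of equal chars
--     chars = sorted(s)
--     runs = []
--     n = len(chars)
--     i = 0
--     while i < n:
--         j = i + 1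
--         while j < n and chars[j] == chars[i]:
--             j += 1
--         runs.append(j - i)
--         i = j
--     if not runs:
--         return True
--     return all(r == runs[0] for r in runs)
-- ===== Notes on version B (the rewrite author's own statement) =====
-- stated objective: alternative
-- what changed: Replaces the frequency dictionary with sort-then-group: B sorts the characters, scans once emitting run lengths, and checks all run lengths equal the first.
import Mathlib
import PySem

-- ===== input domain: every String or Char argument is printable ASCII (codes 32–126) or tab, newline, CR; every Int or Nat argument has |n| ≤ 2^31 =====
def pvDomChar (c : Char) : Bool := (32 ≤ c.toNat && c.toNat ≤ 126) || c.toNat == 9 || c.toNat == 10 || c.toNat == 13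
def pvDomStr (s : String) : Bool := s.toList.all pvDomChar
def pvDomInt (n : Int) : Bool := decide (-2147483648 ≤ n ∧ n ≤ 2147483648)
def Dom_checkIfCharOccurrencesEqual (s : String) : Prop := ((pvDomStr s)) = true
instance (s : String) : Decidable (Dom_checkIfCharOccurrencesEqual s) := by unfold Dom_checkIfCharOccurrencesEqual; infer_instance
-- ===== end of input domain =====

-- B replaces A's frequency dictionary by sort-then-group (run lengths of the sorted characters); alternative decomposition, same results.

-- ===== PORT A =====
-- first loop of A: build the character-frequency dict
def pvCountDictA (l : List Char) : PySem.Dict Char Int :=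
  l.foldl (fun obj c =>
    if obj.contains c then obj.insert c (obj.getD c 0 + 1)  -- obj[c] += 1 (key present, overwrite in place)
    else obj.insert c 1)                                    -- obj[c] = 1
    PySem.Dict.empty

-- second loop of A: 'for value in obj.values(): if value != target: return False'
def pvCheckLoopA (target : Int) : List Int → Bool
  | [] => true
  | v :: rest => if v != target then false else pvCheckLoopA target rest

def checkIfCharOccurrencesEqual (s : String) : Bool :=
  let obj := pvCountDictA s.toList
  -- obj[s[0]]: only compared when obj.values is nonempty, i.e. s nonempty and s[0] a key,
  -- so the '.getD 0' defaults are never the value actually compared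
  let target : Int := ((PySem.Str.pyGet? s 0).bind (fun c => obj.get? c)).getD 0
  pvCheckLoopA target obj.values

-- ===== PORT B =====
-- Source B's outer while loop: each step, the inner while scan finds the current run
-- (takeWhile = the chars equal to chars[i]) and jumps i to its end (dropWhile)
def pvRunsB : List Char → List Nat
  | [] => []
  | c :: t => ((t.takeWhile (fun x => x == c)).length + 1) :: pvRunsB (t.dropWhile (fun x => x == c))
termination_by l => l.length
decreasing_by exact Nat.lt_succ_of_le (List.length_dropWhile_le _ _)

def checkIfCharOccurrencesEqual_alt (s : String) : Bool :=
  let rs := pvRunsB (PySem.List.sorted s.toList (fun x => x) false)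
  match rs with
  | [] => true
  | r0 :: _ => rs.all (fun r => r == r0)

-- ===== PRECONDITION & SPEC =====
def Spec_checkIfCharOccurrencesEqual (s : String) (out : Bool) : Prop := out = checkIfCharOccurrencesEqual_alt s
instance (s : String) (out : Bool) : Decidable (Spec_checkIfCharOccurrencesEqual s out) := by unfold Spec_checkIfCharOccurrencesEqual; infer_instance

-- ===== CLAIM (what is proved, stated in full; the proofs are below) =====
def Claim_equal_checkIfCharOccurrencesEqual : Prop := ∀ (s : String), Dom_checkIfCharOccurrencesEqual s → Spec_checkIfCharOccurrencesEqual s (checkIfCharOccurrencesEqual s)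

-- ===== LEMMAS AND PROOFS =====

-- A's first loop builds exactly Counter(s)
lemma pvCountDictA_eq_counter (l : List Char) : pvCountDictA l = PySem.Dict.counter l := by
  rw [← PySem.Dict.foldl_insert_getD_add_one_eq_counter]
  unfold pvCountDictA
  apply PySem.List.foldl_congr_mem
  intro d x _
  by_cases h : d.contains x = true
  · simp [h]
  · have h' : d.contains x = false := by simpa using h
    have hg : d.getD x 0 = 0 := by simp [pysem, h']
    simp [h', hg]

-- A's second loop is an 'all' over the values
lemma pvCheckLoopA_eq_all (target : Int) (vs : List Int) :
    pvCheckLoopA target vs = vs.all (fun v => v == target) := by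
  induction vs with
  | nil => rfl
  | cons v rest ih =>
    by_cases hv : v = target
    · simp [pvCheckLoopA, hv, ih]
    · simp [pvCheckLoopA, hv]

-- characterization of A on a nonempty string
lemma pvA_true_iff (s : String) (c : Char) (t : List Char) (h : s.toList = c :: t) :
    checkIfCharOccurrencesEqual s = true ↔
      ∀ k ∈ s.toList, s.toList.count k = s.toList.count c := by
  unfold checkIfCharOccurrencesEqual
  rw [pvCountDictA_eq_counter, pvCheckLoopA_eq_all]
  have h0 : PySem.Str.pyGet? s 0 = some c := by simp [pysem, h]
  have hv : (PySem.Dict.counter s.toList).values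
      = (PySem.Set.ofList s.toList).map (fun k => ((s.toList.count k : Int))) := by
    show ((PySem.Dict.counter s.toList).items.map Prod.snd) = _
    rw [PySem.Dict.items_counter, List.map_map]
    simp [Function.comp]
  have ht : ((PySem.Str.pyGet? s 0).bind (fun k => (PySem.Dict.counter s.toList).get? k)).getD 0
      = (s.toList.count c : Int) := by
    rw [h0]
    show (PySem.Dict.counter s.toList).getD c 0 = _
    exact PySem.Dict.getD_counter s.toList c
  rw [hv, ht]
  simp [List.all_map, List.all_eq_true, PySem.Set.mem_ofList, Function.comp]

-- everything the sorted order drops before position i is strictly above the head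
lemma pvDropWhile_gt (c : Char) (t : List Char) (hp : (c :: t).Pairwise (· ≤ ·)) :
    ∀ x ∈ t.dropWhile (fun x => x == c), c < x := by
  intro x hx
  cases hd : t.dropWhile (fun x => x == c) with
  | nil => rw [hd] at hx; cases hx
  | cons h0 rest =>
    rw [hd] at hx
    have hsub : (t.dropWhile (fun x => x == c)).Sublist t := List.dropWhile_sublist _
    have hple := List.pairwise_cons.mp hp
    have hph : (h0 == c) = false := by
      have := List.head_dropWhile_not (fun x => x == c) (l := t) (by simp [hd])
      simpa [hd] using this
    have hh0t : h0 ∈ t := hsub.subset (hd ▸ List.mem_cons_self)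
    have hch : c < h0 := lt_of_le_of_ne (hple.1 h0 hh0t) (Ne.symm (ne_of_beq_false hph))
    have hpd : (h0 :: rest).Pairwise (· ≤ ·) := hd ▸ (hple.2.sublist hsub)
    rcases List.mem_cons.mp hx with rfl | hxr
    · exact hch
    · exact lt_of_lt_of_le hch ((List.pairwise_cons.mp hpd).1 x hxr)

-- the first run length of a sorted list is the count of its head
lemma pvCount_head (c : Char) (t : List Char) (hp : (c :: t).Pairwise (· ≤ ·)) :
    (c :: t).count c = (t.takeWhile (fun x => x == c)).length + 1 := by
  have h1 : (t.takeWhile (fun x => x == c)).count c = (t.takeWhile (fun x => x == c)).length :=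
    List.count_eq_length.mpr (fun b hb => by
      have h3 := List.mem_takeWhile_imp hb
      replace h3 : (b == c) = true := h3
      exact (eq_of_beq h3).symm)
  have h2 : (t.dropWhile (fun x => x == c)).count c = 0 :=
    List.count_eq_zero.mpr (fun hmem => lt_irrefl c (pvDropWhile_gt c t hp c hmem))
  have hsplit : t.count c = (t.takeWhile (fun x => x == c)).count c
      + (t.dropWhile (fun x => x == c)).count c := by
    conv_lhs => rw [← List.takeWhile_append_dropWhile (p := fun x => x == c) (l := t)]
    rw [List.count_append]
  rw [List.count_cons_self, hsplit, h1, h2]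

-- counts of later characters are unchanged by dropping the first run
lemma pvCount_tail (c : Char) (t : List Char) (hp : (c :: t).Pairwise (· ≤ ·))
    (d : Char) (hd : d ∈ t.dropWhile (fun x => x == c)) :
    (c :: t).count d = (t.dropWhile (fun x => x == c)).count d := by
  have hne : d ≠ c := ne_of_gt (pvDropWhile_gt c t hp d hd)
  have h1 : (t.takeWhile (fun x => x == c)).count d = 0 :=
    List.count_eq_zero.mpr (fun hmem => by
      have h3 := List.mem_takeWhile_imp hmem
      replace h3 : (d == c) = true := h3
      exact hne (eq_of_beq h3))
  rw [List.count_cons_of_ne hne.symm]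
  conv_lhs => rw [← List.takeWhile_append_dropWhile (p := fun x => x == c) (l := t)]
  rw [List.count_append, h1, Nat.zero_add]

-- main invariant of B's scan: all run lengths equal v iff every count equals v
lemma pvRuns_all_eq (l : List Char) :
    l.Pairwise (· ≤ ·) → ∀ v : Nat,
      ((pvRunsB l).all (fun r => r == v) = true ↔ ∀ d ∈ l, l.count d = v) := by
  induction l using pvRunsB.induct with
  | case1 => intro _ v; simp [pvRunsB]
  | case2 c t ih =>
    intro hp v
    have hple := List.pairwise_cons.mp hp
    have hpd : (t.dropWhile (fun x => x == c)).Pairwise (· ≤ ·) :=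
      hple.2.sublist (List.dropWhile_sublist _)
    have hIH := ih hpd v
    rw [show pvRunsB (c :: t)
        = ((t.takeWhile (fun x => x == c)).length + 1) :: pvRunsB (t.dropWhile (fun x => x == c))
      from by rw [pvRunsB], List.all_cons, Bool.and_eq_true]
    constructor
    · rintro ⟨hhead, htail⟩
      have hv1 : (c :: t).count c = v := by
        rw [pvCount_head c t hp]; exact beq_iff_eq.mp hhead
      intro d hdmem
      rcases List.mem_cons.mp hdmem with rfl | hdt
      · exact hv1
      · have hdsplit : d ∈ t.takeWhile (fun x => x == c) ∨ d ∈ t.dropWhile (fun x => x == c) := by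
          rw [← List.takeWhile_append_dropWhile (p := fun x => x == c) (l := t)] at hdt
          exact List.mem_append.mp hdt
        rcases hdsplit with hmem | hmem
        · have h3 := List.mem_takeWhile_imp hmem
          replace h3 : (d == c) = true := h3
          have hdc : d = c := eq_of_beq h3
          rw [hdc]; exact hv1
        · rw [pvCount_tail c t hp d hmem]
          exact hIH.mp htail d hmem
    · intro h
      have hv1 : (c :: t).count c = v := h c List.mem_cons_self
      refine ⟨by rw [← pvCount_head c t hp]; exact beq_iff_eq.mpr hv1, hIH.mpr ?_⟩
      intro d hd
      rw [← pvCount_tail c t hp d hd]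
      exact h d (List.mem_cons_of_mem _ ((List.dropWhile_sublist _).subset hd))

-- comparing all counts to the count of one member is independent of which member
lemma pvGlue (l : List Char) (c c' : Char) (hc : c ∈ l) (hc' : c' ∈ l) :
    (∀ k ∈ l, l.count k = l.count c) ↔ (∀ k ∈ l, l.count k = l.count c') := by
  constructor
  · intro h k hk; rw [h k hk, ← h c' hc']
  · intro h k hk; rw [h k hk, ← h c hc]

-- characterization of B on a nonempty string
lemma pvB_true_iff (s : String) (c' : Char) (t' : List Char)
    (h : PySem.List.sorted s.toList (fun x => x) false = c' :: t') :
    checkIfCharOccurrencesEqual_alt s = true ↔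
      ∀ k ∈ s.toList, s.toList.count k = s.toList.count c' := by
  have hp : (c' :: t').Pairwise (· ≤ ·) := by
    have := PySem.List.sorted_pairwise s.toList (fun x => x)
    rw [h] at this; simpa using this
  have hperm : (c' :: t').Perm s.toList := by
    have := PySem.List.sorted_perm s.toList (fun x => x) false
    rwa [h] at this
  have hcnt := pvCount_head c' t' hp
  have hmain := pvRuns_all_eq (c' :: t') hp ((t'.takeWhile (fun x => x == c')).length + 1)
  unfold checkIfCharOccurrencesEqual_alt
  rw [h, show pvRunsB (c' :: t')
      = ((t'.takeWhile (fun x => x == c')).length + 1) :: pvRunsB (t'.dropWhile (fun x => x == c'))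
    from by rw [pvRunsB]]
  rw [show (match ((t'.takeWhile (fun x => x == c')).length + 1)
        :: pvRunsB (t'.dropWhile (fun x => x == c')) with
      | [] => true
      | r0 :: _ => (r0 :: pvRunsB (t'.dropWhile (fun x => x == c'))).all (fun r => r == r0))
      = (((t'.takeWhile (fun x => x == c')).length + 1)
        :: pvRunsB (t'.dropWhile (fun x => x == c'))).all
          (fun r => r == (t'.takeWhile (fun x => x == c')).length + 1) from rfl]
  rw [show (((t'.takeWhile (fun x => x == c')).length + 1)
        :: pvRunsB (t'.dropWhile (fun x => x == c')))
      = pvRunsB (c' :: t') from by rw [pvRunsB]]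
  rw [hmain]
  constructor
  · intro hB k hk
    have hk' : k ∈ c' :: t' := hperm.mem_iff.mpr hk
    have h1 : (c' :: t').count k = (t'.takeWhile (fun x => x == c')).length + 1 := hB k hk'
    rw [← hperm.count_eq k, ← hperm.count_eq c', h1, hcnt]
  · intro hS d hd
    have hd' : d ∈ s.toList := hperm.mem_iff.mp hd
    rw [hperm.count_eq d, hS d hd', ← hperm.count_eq c', hcnt]

-- ===== VERDICT (by name: the statement is the Claim_ definition above) =====
theorem checkIfCharOccurrencesEqual_spec : Claim_equal_checkIfCharOccurrencesEqual := by
  intro s _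
  unfold Spec_checkIfCharOccurrencesEqual
  rcases hl : s.toList with _ | ⟨c, t⟩
  · -- empty string: both loops see an empty sequence and both sides are true
    unfold checkIfCharOccurrencesEqual checkIfCharOccurrencesEqual_alt
    rw [hl,
      show (PySem.List.sorted ([] : List Char) (fun x => x) false) = []
        from (PySem.List.sorted_eq_nil_iff _ _ _).mpr rfl,
      show pvRunsB [] = [] from by rw [pvRunsB]]
    rfl
  · rcases hl' : PySem.List.sorted s.toList (fun x => x) false with _ | ⟨c', t'⟩
    · exact absurd (((PySem.List.sorted_eq_nil_iff _ _ _).mp hl').symm.trans hl) (by simp)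
    · have hperm := PySem.List.sorted_perm s.toList (fun x => x) false
      rw [hl'] at hperm
      have hc : c ∈ s.toList := by rw [hl]; exact List.mem_cons_self
      have hc' : c' ∈ s.toList := hperm.mem_iff.mp List.mem_cons_self
      rw [Bool.eq_iff_iff, pvA_true_iff s c t hl, pvB_true_iff s c' t' hl']
      exact pvGlue _ c c' hc hc'
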